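-- pv_equiv track=rewrite | github.com/ericka-cespedes/IntroProgrammingPY | Practica6.py | concordarAux
-- ===== SOURCE A (Python) =====
-- def concordarAux(patron, sustitucion, original, i):
--     if i==len(original):
--         return original
--     else:
--         if original[i] in patron:
--             indice = buscarIndice(original[i], patron, 0) #Indice del elemento en la lista patron
--             original[i] = sustitucion[indice]
--
--         return concordarAux(patron, sustitucion, original, i+1)
--
-- def buscarIndice(ele, lista, i): #Para saber en que indice esta el elemento
--     if i==len(lista):
--         return 0
--     else:
--         if ele==lista[i]:
--             return i
--         else:
--             return buscarIndice(ele, lista, i+1)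
-- ===== SOURCE B (Python) =====
-- def concordarAux(patron, sustitucion, original, i):
--     mapping = {}
--     for p, s in zip(patron, sustitucion):
--         if p not in mapping:
--             mapping[p] = s
--     original[i:] = [mapping.get(x, x) for x in original[i:]]
--     return original
-- ===== Notes on version B (the rewrite author's own statement) =====
-- stated objective: faster
-- what changed: Replaces the element-by-element recursion with its inner linear buscarIndice scan by building a first-occurrence pattern->replacement dict once and rewriting the suffix original[i:] in a single slice assignment.
-- outside the precondition, e.g. on concordarAux([1], [2], [1, 1], -1): A returns [2, 2], B returns [1, 2]; on concordarAux([1], [], [1], 0): A raises IndexError, B returns [1]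
import Mathlib
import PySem

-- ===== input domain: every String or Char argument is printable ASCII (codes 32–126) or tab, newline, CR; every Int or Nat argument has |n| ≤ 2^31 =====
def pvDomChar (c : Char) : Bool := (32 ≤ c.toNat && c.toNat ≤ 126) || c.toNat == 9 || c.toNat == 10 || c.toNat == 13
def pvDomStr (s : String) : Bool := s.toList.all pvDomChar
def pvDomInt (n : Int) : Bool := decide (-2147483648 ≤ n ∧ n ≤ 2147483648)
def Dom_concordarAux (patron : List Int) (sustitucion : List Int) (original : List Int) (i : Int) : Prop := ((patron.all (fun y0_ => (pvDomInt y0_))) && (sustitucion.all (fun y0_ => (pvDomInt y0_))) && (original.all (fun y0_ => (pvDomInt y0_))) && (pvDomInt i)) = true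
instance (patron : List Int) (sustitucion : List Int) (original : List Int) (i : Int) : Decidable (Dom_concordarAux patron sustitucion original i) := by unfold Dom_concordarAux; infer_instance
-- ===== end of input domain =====

-- B replaces A's recursion (with a linear buscarIndice scan per element) by a first-occurrence
-- dict built once plus one slice assignment on original[i:]; both A and B mutate `original` in
-- place on the stated domain and return it, the theorems below are about the returned value.

-- ===== PORT A =====
def buscarIndice (ele : Int) (lista : List Int) (i : Int) : Int :=
  if i = (lista.length : Int) then 0
  else
    match h : PySem.List.pyGet? lista i with
    | none => 0  -- Python raises IndexError here; unreachable from A's call sites under Pre_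
    | some v =>
      if ele = v then i
      else buscarIndice ele lista (i + 1)
termination_by ((lista.length : Int) - i).toNat
decreasing_by
  have hin : PySem.Raise.InRange lista.length i := by
    by_contra hc
    rw [(PySem.List.pyGet?_eq_none_iff lista i).mpr hc] at h
    simp at h
  rcases hin with ⟨_, hlt⟩
  omega

def concordarAux (patron : List Int) (sustitucion : List Int) (original : List Int) (i : Int) : List Int :=
  if i = (original.length : Int) then original
  else
    match h : PySem.List.pyGet? original i with
    | none => original  -- Python raises IndexError here; excluded by Pre_
    | some v =>
      if patron.contains v then
        let indice := buscarIndice v patron 0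
        match PySem.List.pyGet? sustitucion indice with
        | none => original  -- Python raises IndexError here; excluded by Pre_
        | some s => concordarAux patron sustitucion (PySem.List.pySetD original i s) (i + 1)
      else concordarAux patron sustitucion original (i + 1)
termination_by ((original.length : Int) - i).toNat
decreasing_by
  · have hin : PySem.Raise.InRange original.length i := by
      by_contra hc
      rw [(PySem.List.pyGet?_eq_none_iff original i).mpr hc] at h
      simp at h
    rcases hin with ⟨_, hlt⟩
    rw [PySem.List.length_pySetD]
    omega
  · have hin : PySem.Raise.InRange original.length i := by
      by_contra hc
      rw [(PySem.List.pyGet?_eq_none_iff original i).mpr hc] at h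
      simp at h
    rcases hin with ⟨_, hlt⟩
    omega

-- ===== PORT B =====
def concordarAux_alt (patron : List Int) (sustitucion : List Int) (original : List Int) (i : Int) : List Int :=
  let mapping : PySem.Dict Int Int :=
    (patron.zip sustitucion).foldl
      (fun d ps => if d.contains ps.1 then d else d.insert ps.1 ps.2) PySem.Dict.empty
  PySem.List.slice original none (some i) ++
    (PySem.List.slice original (some i) none).map (fun x => mapping.getD x x)

-- ===== PRECONDITION & SPEC =====
-- Pre_ restricts to the helper's natural domain 0 ≤ i ≤ len(original) (requiring each
-- substitutable suffix element's first pattern index to lie within sustitucion, since A raises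
-- IndexError otherwise); A also accepts -len ≤ i < 0 via Python's index wraparound, walking from
-- position len+i and substituting the tail elements twice, which B (treating i as a slice start)
-- does not reproduce — such i are admitted only when no element of original occurs in patron, in
-- which case both programs are no-ops.
def Pre_concordarAux (patron : List Int) (sustitucion : List Int) (original : List Int) (i : Int) : Prop :=
  (0 ≤ i ∧ i ≤ (original.length : Int) ∧
    ∀ x ∈ original.drop i.toNat, x ∈ patron → patron.idxOf x < sustitucion.length) ∨
  (-(original.length : Int) ≤ i ∧ i < 0 ∧ ∀ x ∈ original, x ∉ patron)
instance (patron : List Int) (sustitucion : List Int) (original : List Int) (i : Int) : Decidable (Pre_concordarAux patron sustitucion original i) := by unfold Pre_concordarAux; infer_instance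

def pvWitness_concordarAux : List Int × List Int × List Int × Int := ([1, 3], [5, 6], [1, 2, 3], 0)

def Spec_concordarAux (patron : List Int) (sustitucion : List Int) (original : List Int) (i : Int) (out : List Int) : Prop := out = concordarAux_alt patron sustitucion original i
instance (patron : List Int) (sustitucion : List Int) (original : List Int) (i : Int) (out : List Int) : Decidable (Spec_concordarAux patron sustitucion original i out) := by unfold Spec_concordarAux; infer_instance

-- ===== CLAIM (what is proved, stated in full; the proofs are below) =====
def Claim_equal_concordarAux : Prop := ∀ (patron : List Int) (sustitucion : List Int) (original : List Int) (i : Int), Dom_concordarAux patron sustitucion original i → Pre_concordarAux patron sustitucion original i → Spec_concordarAux patron sustitucion original i (concordarAux patron sustitucion original i)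

-- ===== LEMMAS AND PROOFS =====

-- the value every element of the suffix is rewritten to: first matching pair of zip patron sustitucion
def subFn (patron sustitucion : List Int) (x : Int) : Int :=
  (List.lookup x (patron.zip sustitucion)).getD x

theorem lookup_zip_of_mem (patron : List Int) (sustitucion : List Int) (x : Int)
    (hx : x ∈ patron) :
    List.lookup x (patron.zip sustitucion) = sustitucion[patron.idxOf x]? := by
  induction patron generalizing sustitucion with
  | nil => cases hx
  | cons p ps ih =>
    cases sustitucion with
    | nil => simp
    | cons s ss =>
      by_cases hpx : p = x
      · subst hpx
        simp [List.idxOf_cons_self]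
      · have hx' : x ∈ ps := by
          rcases List.mem_cons.mp hx with h | h
          · exact absurd h.symm hpx
          · exact h
        have hbe : (x == p) = false := by simp [Ne.symm hpx]
        simp [List.lookup, hbe, List.idxOf_cons_ne _ hpx, ih ss hx']

theorem lookup_zip_of_not_mem (patron : List Int) (sustitucion : List Int) (x : Int)
    (hx : x ∉ patron) :
    List.lookup x (patron.zip sustitucion) = none := by
  induction patron generalizing sustitucion with
  | nil => simp
  | cons p ps ih =>
    cases sustitucion with
    | nil => simp
    | cons s ss =>
      have hne : p ≠ x := fun h => hx (h ▸ List.mem_cons_self)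
      have hbe : (x == p) = false := by simp [Ne.symm hne]
      simp [List.lookup, hbe, ih ss (fun h => hx (List.mem_cons_of_mem _ h))]

theorem get?_foldl_firstwins (l : List (Int × Int)) (d : PySem.Dict Int Int) (k : Int) :
    (l.foldl (fun d ps => if d.contains ps.1 then d else d.insert ps.1 ps.2) d).get? k
      = (d.get? k).or (List.lookup k l) := by
  induction l generalizing d with
  | nil => simp [List.lookup]
  | cons ps l ih =>
    obtain ⟨p, s⟩ := ps
    simp only [List.foldl_cons]
    by_cases hc : d.contains p = true
    · rw [if_pos hc, ih]
      by_cases hk : k = p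
      · have hsome : (d.get? k).isSome := by
          rw [← PySem.Dict.contains_eq_isSome_get?, hk]; exact hc
        rcases Option.isSome_iff_exists.mp hsome with ⟨v, hv⟩
        simp [List.lookup, hv]
      · have hbe : (k == p) = false := by simp [hk]
        simp [List.lookup, hbe]
    · rw [if_neg hc, ih]
      by_cases hk : k = p
      · have hnone : d.get? k = none := by
          rw [← Option.not_isSome_iff_eq_none, ← PySem.Dict.contains_eq_isSome_get?, hk]
          simp [hc]
        rw [hk] at hnone
        simp [List.lookup, hk, hnone]
      · have hbe : (k == p) = false := by simp [hk]
        simp [List.lookup, PySem.Dict.get?_insert, hk, hbe]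

theorem alt_eq_take_map (patron sustitucion original : List Int) (i : Int) (hi : 0 ≤ i) :
    concordarAux_alt patron sustitucion original i
      = original.take i.toNat ++ (original.drop i.toNat).map (subFn patron sustitucion) := by
  have hz : concordarAux_alt patron sustitucion original i
      = PySem.List.slice original none (some i) ++
        (PySem.List.slice original (some i) none).map
          (fun x => ((patron.zip sustitucion).foldl
            (fun d ps => if d.contains ps.1 then d else d.insert ps.1 ps.2)
            PySem.Dict.empty).getD x x) := rfl
  rw [hz, PySem.List.slice_to original hi, PySem.List.slice_from original hi]
  congr 1
  apply List.map_congr_left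
  intro x _
  have := get?_foldl_firstwins (patron.zip sustitucion) PySem.Dict.empty x
  simp only [PySem.Dict.get?_empty, Option.or] at this
  simp [PySem.Dict.getD_eq_get?_getD, this, subFn]

theorem buscarIndice_eq (ele : Int) (lista : List Int) (i : Int) (hi : 0 ≤ i)
    (hmem : ele ∈ lista.drop i.toNat) :
    buscarIndice ele lista i = i + ((lista.drop i.toNat).idxOf ele : Int) := by
  have hlt : i < (lista.length : Int) := by
    by_contra hge
    have hnil : lista.drop i.toNat = [] := List.drop_eq_nil_of_le (by omega)
    rw [hnil] at hmem
    cases hmem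
  have hget : PySem.List.pyGet? lista i = some (lista[i.toNat]'(by omega)) :=
    PySem.List.pyGet?_eq_some_getElem lista hi hlt
  have hdropcons : lista.drop i.toNat = lista[i.toNat]'(by omega) :: lista.drop (i.toNat + 1) :=
    List.drop_eq_getElem_cons (by omega)
  rw [buscarIndice, if_neg (by omega)]
  split
  · next h => rw [hget] at h; cases h
  · next v h =>
    rw [hget] at h
    have hv : v = lista[i.toNat]'(by omega) := (Option.some.inj h).symm
    subst hv
    by_cases he : ele = lista[i.toNat]'(by omega)
    · rw [if_pos he, hdropcons, ← he, List.idxOf_cons_self]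
      simp
    · rw [if_neg he]
      have hmem' : ele ∈ lista.drop (i.toNat + 1) := by
        rw [hdropcons] at hmem
        rcases List.mem_cons.mp hmem with h' | h'
        · exact absurd h' he
        · exact h'
      have htn : (i + 1).toNat = i.toNat + 1 := by omega
      have hrec := buscarIndice_eq ele lista (i + 1) (by omega) (by rw [htn]; exact hmem')
      rw [hrec, htn, hdropcons, List.idxOf_cons_ne _ (fun h' => he h'.symm)]
      push_cast
      ring
termination_by ((lista.length : Int) - i).toNat
decreasing_by omega

theorem concordarAux_eq_take_map (patron sustitucion original : List Int) (i : Int)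
    (h0 : 0 ≤ i) (hle : i ≤ (original.length : Int))
    (hidx : ∀ x ∈ original.drop i.toNat, x ∈ patron → patron.idxOf x < sustitucion.length) :
    concordarAux patron sustitucion original i
      = original.take i.toNat ++ (original.drop i.toNat).map (subFn patron sustitucion) := by
  rw [concordarAux]
  by_cases hend : i = (original.length : Int)
  · rw [if_pos hend]
    have ht : i.toNat = original.length := by omega
    simp [ht]
  · rw [if_neg hend]
    have hlt : i < (original.length : Int) := lt_of_le_of_ne hle hend
    have hget : PySem.List.pyGet? original i = some (original[i.toNat]'(by omega)) :=
      PySem.List.pyGet?_eq_some_getElem original h0 hlt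
    have hdropcons : original.drop i.toNat
        = original[i.toNat]'(by omega) :: original.drop (i.toNat + 1) :=
      List.drop_eq_getElem_cons (by omega)
    have htn : (i + 1).toNat = i.toNat + 1 := by omega
    split
    · next h => rw [hget] at h; cases h
    · next v h =>
      rw [hget] at h
      have hv : v = original[i.toNat]'(by omega) := (Option.some.inj h).symm
      have hvmem : v ∈ original.drop i.toNat := by rw [hdropcons, ← hv]; exact List.mem_cons_self
      by_cases hvp : v ∈ patron
      · rw [if_pos (by simpa using hvp)]
        have hbi : buscarIndice v patron 0 = (patron.idxOf v : Int) := by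
          have := buscarIndice_eq v patron 0 le_rfl (by simpa using hvp)
          simpa using this
        have hidxlt : patron.idxOf v < sustitucion.length := hidx v hvmem hvp
        have hgets : PySem.List.pyGet? sustitucion (buscarIndice v patron 0)
            = some (sustitucion[patron.idxOf v]'hidxlt) := by
          rw [hbi]
          have hcast : ((patron.idxOf v : Int)).toNat = patron.idxOf v := by omega
          have := PySem.List.pyGet?_eq_some_getElem (xs := sustitucion) (i := (patron.idxOf v : Int))
            (by positivity) (by exact_mod_cast hidxlt)
          simpa [hcast] using this
        have hsub : subFn patron sustitucion v = sustitucion[patron.idxOf v]'hidxlt := by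
          unfold subFn
          rw [lookup_zip_of_mem patron sustitucion v hvp]
          simp [List.getElem?_eq_getElem hidxlt]
        show (match PySem.List.pyGet? sustitucion (buscarIndice v patron 0) with
          | none => original
          | some s => concordarAux patron sustitucion (PySem.List.pySetD original i s) (i + 1)) = _
        split
        · next h2 => rw [hgets] at h2; cases h2
        · next s2 h2 =>
          rw [hgets] at h2
          have hs2 : s2 = sustitucion[patron.idxOf v]'hidxlt := (Option.some.inj h2).symm
          subst hs2
          set w := sustitucion[patron.idxOf v]'hidxlt with hw
          set orig' := PySem.List.pySetD original i w with ho'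
          have ho'set : orig' = original.set i.toNat w := by
            rw [ho', PySem.List.pySetD_of_nonneg original w h0]
          have hlen' : orig'.length = original.length := by rw [ho'set]; simp
          have hdrop' : orig'.drop (i.toNat + 1) = original.drop (i.toNat + 1) := by
            rw [ho'set]
            exact List.drop_set_of_lt (by omega)
          have htake' : orig'.take (i.toNat + 1) = original.take i.toNat ++ [w] := by
            rw [List.take_add_one]
            congr 1
            · rw [ho'set]
              exact List.take_set_of_le (le_refl _)
            · rw [ho'set]
              simp [(by omega : i.toNat < original.length)]
          have hrec := concordarAux_eq_take_map patron sustitucion orig' (i + 1)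
            (by omega) (by rw [hlen']; exact_mod_cast (by omega : i + 1 ≤ (original.length : Int)))
            (by intro x hx hxp
                rw [htn, hdrop'] at hx
                exact hidx x (by rw [hdropcons]; exact List.mem_cons_of_mem _ hx) hxp)
          rw [hrec, htn, hdrop', htake', hdropcons]
          simp [← hv, hsub]
      · rw [if_neg (by simpa using hvp)]
        have hrec := concordarAux_eq_take_map patron sustitucion original (i + 1)
          (by omega) (by omega)
          (by intro x hx hxp
              rw [htn] at hx
              exact hidx x (by rw [hdropcons]; exact List.mem_cons_of_mem _ hx) hxp)
        rw [hrec, htn, hdropcons]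
        have hsub : subFn patron sustitucion v = v := by
          unfold subFn
          rw [lookup_zip_of_not_mem patron sustitucion v hvp]
          rfl
        rw [List.take_add_one]
        simp [← hv, hsub, (by omega : i.toNat < original.length)]
termination_by ((original.length : Int) - i).toNat
decreasing_by
  · simp only [PySem.List.length_pySetD]; omega
  · omega

theorem concordarAux_noop (patron sustitucion original : List Int) (i : Int)
    (hge : -(original.length : Int) ≤ i) (hle : i ≤ (original.length : Int))
    (hdisj : ∀ x ∈ original, x ∉ patron) :
    concordarAux patron sustitucion original i = original := by
  rw [concordarAux]
  by_cases hend : i = (original.length : Int)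
  · rw [if_pos hend]
  · rw [if_neg hend]
    split
    · next h => rfl
    · next v h =>
      have hv : v ∈ original := PySem.List.mem_of_pyGet?_eq_some original h
      rw [if_neg (by simpa using hdisj v hv)]
      exact concordarAux_noop patron sustitucion original (i + 1) (by omega) (by omega) hdisj
termination_by ((original.length : Int) - i).toNat
decreasing_by omega

theorem alt_noop (patron sustitucion original : List Int) (i : Int)
    (hge : -(original.length : Int) ≤ i)
    (hdisj : ∀ x ∈ original, x ∉ patron) :
    concordarAux_alt patron sustitucion original i = original := by
  have hz : concordarAux_alt patron sustitucion original i
      = PySem.List.slice original none (some i) ++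
        (PySem.List.slice original (some i) none).map
          (fun x => ((patron.zip sustitucion).foldl
            (fun d ps => if d.contains ps.1 then d else d.insert ps.1 ps.2)
            PySem.Dict.empty).getD x x) := rfl
  rw [hz]
  have hmap : (PySem.List.slice original (some i) none).map
      (fun x => ((patron.zip sustitucion).foldl
        (fun d ps => if d.contains ps.1 then d else d.insert ps.1 ps.2)
        PySem.Dict.empty).getD x x) = PySem.List.slice original (some i) none := by
    have hpt : ∀ x ∈ PySem.List.slice original (some i) none,
        ((patron.zip sustitucion).foldl
          (fun d ps => if d.contains ps.1 then d else d.insert ps.1 ps.2)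
          PySem.Dict.empty).getD x x = x := by
      intro x hx
      have hxo : x ∈ original := PySem.List.mem_of_mem_slice original (some i) none hx
      have hl := get?_foldl_firstwins (patron.zip sustitucion) PySem.Dict.empty x
      simp only [PySem.Dict.get?_empty, Option.or] at hl
      simp [PySem.Dict.getD_eq_get?_getD, hl,
        lookup_zip_of_not_mem patron sustitucion x (hdisj x hxo)]
    calc (PySem.List.slice original (some i) none).map
          (fun x => ((patron.zip sustitucion).foldl
            (fun d ps => if d.contains ps.1 then d else d.insert ps.1 ps.2)
            PySem.Dict.empty).getD x x)
        = (PySem.List.slice original (some i) none).map id := List.map_congr_left hpt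
      _ = PySem.List.slice original (some i) none := List.map_id _
  rw [hmap]
  by_cases h0 : 0 ≤ i
  · rw [PySem.List.slice_to original h0, PySem.List.slice_from original h0]
    exact List.take_append_drop _ _
  · have hk : i = -(((-i).toNat : Nat) : Int) := by omega
    rw [hk, PySem.List.slice_to_neg_natCast original ((-i).toNat) (by omega), PySem.List.slice_from_neg_natCast original ((-i).toNat) (by omega)]
    exact List.take_append_drop _ _

-- ===== VERDICT (by name: the statement is the Claim_ definition above) =====
theorem concordarAux_spec : Claim_equal_concordarAux := by
  intro patron sustitucion original i _ hpre
  unfold Spec_concordarAux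
  rcases hpre with ⟨h0, hle, hidx⟩ | ⟨hge, hneg, hdisj⟩
  · rw [concordarAux_eq_take_map patron sustitucion original i h0 hle hidx,
        alt_eq_take_map patron sustitucion original i h0]
  · rw [concordarAux_noop patron sustitucion original i hge (by omega) hdisj,
        alt_noop patron sustitucion original i hge hdisj]
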